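-- pv_equiv track=rewrite | github.com/miliar/Code_Jam_Webscraper | solutions_python/Problem_55/696.py | do_case
-- ===== SOURCE A (Python) =====
-- def do_case(seats=0, runs=0, groups=[]):
--     euros = 0
--     while runs > 0:
--         seated = 0
--         g_count = 0
--         while seated < seats:
--             next_group = groups.pop(0)
--             if next_group <= seats - seated:
--                 seated += next_group
--                 groups.append(next_group)
--                 g_count += 1
--                 if g_count == len(groups):
--                     break
--             else:
--                 groups.insert(0, next_group)
--                 break
--         euros += seated
--         runs -= 1
--     return euros
-- ===== SOURCE B (Python) =====
-- def do_case(seats=0, runs=0, groups=[]):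
--     # Return-value equivalent to A; unlike A, B does not mutate `groups`.
--     n = len(groups)
--     if runs <= 0 or seats <= 0:
--         return 0
--
--     def one_run(i):
--         # one run starting at position i of the cyclic queue: (revenue, next start)
--         seated = 0
--         k = 0
--         while seated < seats and k < n:
--             g = groups[(i + k) % n]
--             if g > seats - seated:
--                 break
--             seated += g
--             k += 1
--         return seated, (i + k) % n
--
--     # walk the runs, memorising each start position; stop at the first repeat
--     seen = {}
--     euros = 0
--     i = 0
--     step = 0
--     while step < runs and i not in seen:
--         seen[i] = (step, euros)
--         rev, i = one_run(i)
--         euros += rev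
--         step += 1
--     if step < runs:
--         # cycle found: add whole cycles in closed form, then finish the remainder
--         s0, e0 = seen[i]
--         cyc = step - s0
--         crev = euros - e0
--         rem = runs - step
--         euros += (rem // cyc) * crev
--         for _ in range(rem % cyc):
--             rev, i = one_run(i)
--             euros += rev
--     return euros
-- ===== Notes on version B (the rewrite author's own statement) =====
-- stated objective: faster
-- what changed: A re-simulates the mutable queue run by run; B observes that the queue state is always a rotation of the input, memoises (revenue, next start) per start position while walking the runs, detects the first repeated start position and adds all remaining whole cycles in closed form, finishing only the remainder; B never mutates the list.
import Mathlib
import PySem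

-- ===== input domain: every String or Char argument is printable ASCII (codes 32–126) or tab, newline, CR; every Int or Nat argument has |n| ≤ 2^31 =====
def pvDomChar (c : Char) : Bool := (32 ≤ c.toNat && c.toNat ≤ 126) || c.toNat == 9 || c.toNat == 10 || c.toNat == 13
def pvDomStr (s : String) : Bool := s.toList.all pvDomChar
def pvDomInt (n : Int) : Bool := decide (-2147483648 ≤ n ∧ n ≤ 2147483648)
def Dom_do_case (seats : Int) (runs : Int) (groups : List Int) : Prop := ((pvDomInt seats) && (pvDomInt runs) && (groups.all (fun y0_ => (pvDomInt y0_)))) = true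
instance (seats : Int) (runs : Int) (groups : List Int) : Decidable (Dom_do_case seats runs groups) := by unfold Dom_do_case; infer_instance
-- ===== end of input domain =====

-- B: the queue state is always a rotation of the input, so B memoises (revenue, next start)
-- per start position, detects the first repeated start and adds whole cycles in closed form;
-- the equivalence proved is about the RETURN value only (A rotates `groups` in place, B does not).

-- ===== PORT A =====
-- A's inner while-loop, state (seated, g_count, queue); `fuel` only makes the recursion total
-- (the Python loop iterates at most len(groups) times: it breaks once g_count reaches the length).
def doCaseInnerA (seats : Int) (fuel : Nat) (seated : Int) (g_count : Nat) (q : List Int) : Int × List Int :=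
  match fuel with
  | 0 => (seated, q)
  | fuel + 1 =>
    if seated < seats then
      match q with
      | [] => (seated, [])        -- Python raises IndexError here (groups.pop(0) on empty); excluded by Pre_
      | ng :: rest =>
        if ng ≤ seats - seated then
          if g_count + 1 = (rest ++ [ng]).length then (seated + ng, rest ++ [ng])
          else doCaseInnerA seats fuel (seated + ng) (g_count + 1) (rest ++ [ng])
        else (seated, ng :: rest)
    else (seated, q)

-- A's outer while-loop over `runs`
def doCaseOuterA (seats : Int) (runs : Int) (q : List Int) (euros : Int) : Int :=
  if _h : runs > 0 then
    doCaseOuterA seats (runs - 1) (doCaseInnerA seats q.length 0 0 q).2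
      (euros + (doCaseInnerA seats q.length 0 0 q).1)
  else euros
termination_by runs.toNat
decreasing_by omega

def do_case (seats : Int) (runs : Int) (groups : List Int) : Int :=
  doCaseOuterA seats runs groups 0

-- ===== PORT B =====
-- Source B's one_run(i): one run starting at position i of the cyclic queue: (revenue, next start)
def doCaseRunB (seats : Int) (groups : List Int) (n : Nat) (i : Nat) (seated : Int) (k : Nat) : Int × Nat :=
  if h : seated < seats ∧ k < n then
    -- g = groups[(i+k) % n]; the index is always < n = len(groups) in Source B
    if groups.getD ((i + k) % n) 0 > seats - seated then (seated, (i + k) % n)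
    else doCaseRunB seats groups n i (seated + groups.getD ((i + k) % n) 0) (k + 1)
  else (seated, (i + k) % n)
termination_by n - k
decreasing_by omega

-- Source B's first while-loop: walk the runs memorising each start position, stop at the first repeat
def doCaseSeenB (seats : Int) (groups : List Int) (n : Nat) (runs : Nat)
    (seen : PySem.Dict Nat (Nat × Int)) (euros : Int) (i : Nat) (step : Nat) :
    PySem.Dict Nat (Nat × Int) × Int × Nat × Nat :=
  if _h : step < runs ∧ seen.contains i = false then
    doCaseSeenB seats groups n runs (seen.insert i (step, euros))
      (euros + (doCaseRunB seats groups n i 0 0).1) (doCaseRunB seats groups n i 0 0).2 (step + 1)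
  else (seen, euros, i, step)
termination_by runs - step
decreasing_by omega

-- Source B's final `for _ in range(rem % cyc)` loop
def doCaseTailB (seats : Int) (groups : List Int) (n : Nat) : Int → Nat → Nat → Int
  | euros, _, 0 => euros
  | euros, i, r + 1 =>
    doCaseTailB seats groups n (euros + (doCaseRunB seats groups n i 0 0).1)
      (doCaseRunB seats groups n i 0 0).2 r

-- Source B after the first while-loop: whole cycles in closed form, then the remainder
def doCaseFinishB (seats : Int) (groups : List Int) (n : Nat) (runsN : Nat)
    (res : PySem.Dict Nat (Nat × Int) × Int × Nat × Nat) : Int :=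
  if res.2.2.2 < runsN then
    match res.1.get? res.2.2.1 with
    | some (s0, e0) =>
      doCaseTailB seats groups n
        (res.2.1 + (((runsN - res.2.2.2) / (res.2.2.2 - s0) : Nat) : Int) * (res.2.1 - e0))
        res.2.2.1 ((runsN - res.2.2.2) % (res.2.2.2 - s0))
    | none => res.2.1   -- unreachable: the loop only stops early when i is in seen
  else res.2.1

def do_case_alt (seats : Int) (runs : Int) (groups : List Int) : Int :=
  if runs ≤ 0 ∨ seats ≤ 0 then 0
  else
    doCaseFinishB seats groups groups.length runs.toNat
      (doCaseSeenB seats groups groups.length runs.toNat PySem.Dict.empty 0 0 0)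

-- ===== PRECONDITION & SPEC =====
-- Pre_ only excludes inputs on which A raises IndexError: groups = [] with seats > 0 and runs > 0
-- (A pops from the empty list; B raises there too).
def Pre_do_case (seats : Int) (runs : Int) (groups : List Int) : Prop :=
  groups ≠ [] ∨ seats ≤ 0 ∨ runs ≤ 0
instance (seats : Int) (runs : Int) (groups : List Int) : Decidable (Pre_do_case seats runs groups) := by
  unfold Pre_do_case; infer_instance

def pvWitness_do_case : Int × Int × List Int := (4, 3, [1, 2, 3])

def Spec_do_case (seats : Int) (runs : Int) (groups : List Int) (out : Int) : Prop := out = do_case_alt seats runs groups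
instance (seats : Int) (runs : Int) (groups : List Int) (out : Int) : Decidable (Spec_do_case seats runs groups out) := by unfold Spec_do_case; infer_instance

-- ===== CLAIM (what is proved, stated in full; the proofs are below) =====
def Claim_equal_do_case : Prop := ∀ (seats : Int) (runs : Int) (groups : List Int), Dom_do_case seats runs groups → Pre_do_case seats runs groups → Spec_do_case seats runs groups (do_case seats runs groups)

-- ===== LEMMAS AND PROOFS =====

-- the queue A maintains is always a rotation of the original list
def pvRot (groups : List Int) (j : Nat) : List Int := groups.drop j ++ groups.take j

theorem pvRot_length (groups : List Int) (j : Nat) (h : j ≤ groups.length) :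
    (pvRot groups j).length = groups.length := by
  simp [pvRot]; omega

theorem pvRot_cons (groups : List Int) (m : Nat) (h : m < groups.length) :
    pvRot groups m = groups.getD m 0 :: (groups.drop (m + 1) ++ groups.take m) := by
  unfold pvRot
  rw [List.drop_eq_getElem_cons h, List.getD_eq_getElem groups 0 h, List.cons_append]

theorem pvRot_step (groups : List Int) (m : Nat) (h : m < groups.length) :
    (groups.drop (m + 1) ++ groups.take m) ++ [groups.getD m 0]
      = pvRot groups ((m + 1) % groups.length) := by
  rw [List.append_assoc]
  have ht : groups.take m ++ [groups.getD m 0] = groups.take (m + 1) := by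
    rw [List.getD_eq_getElem groups 0 h, List.take_add_one, List.getElem?_eq_getElem h]
    rfl
  rw [ht]
  rcases Nat.lt_or_ge (m + 1) groups.length with h1 | h1
  · rw [Nat.mod_eq_of_lt h1]; rfl
  · have he : m + 1 = groups.length := by omega
    rw [he]
    simp [pvRot]

theorem pvRunB_lt (seats : Int) (groups : List Int) (n : Nat) (hn : 0 < n) :
    ∀ (i : Nat) (seated : Int) (k : Nat), (doCaseRunB seats groups n i seated k).2 < n := by
  intro i seated k
  induction seated, k using doCaseRunB.induct (seats := seats) (groups := groups) (n := n) (i := i) with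
  | case1 seated k h hg =>
    rw [doCaseRunB, dif_pos h, if_pos hg]
    exact Nat.mod_lt _ hn
  | case2 seated k h hg ih =>
    rw [doCaseRunB, dif_pos h, if_neg hg]
    exact ih
  | case3 seated k h =>
    rw [doCaseRunB, dif_neg h]
    exact Nat.mod_lt _ hn

-- A's inner loop on the rotated queue computes exactly B's per-start simulation
theorem pvInner_eq (seats : Int) (groups : List Int) (n : Nat) (hn : n = groups.length) (i : Nat) :
    ∀ (f k : Nat) (seated : Int), f = n - k → k < n →
      doCaseInnerA seats f seated k (pvRot groups ((i + k) % n))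
        = ((doCaseRunB seats groups n i seated k).1,
           pvRot groups (doCaseRunB seats groups n i seated k).2) := by
  intro f
  induction f with
  | zero => intro k seated hf hk; omega
  | succ f ih =>
    intro k seated hf hk
    have hn0 : 0 < n := by omega
    have hm : (i + k) % n < groups.length := by rw [← hn]; exact Nat.mod_lt _ hn0
    set m := (i + k) % n with hmdef
    have hlen : (groups.drop (m + 1) ++ groups.take m ++ [groups.getD m 0]).length = n := by
      simp [List.length_append]
      omega
    have hmod : (m + 1) % n = (i + (k + 1)) % n := by
      rw [hmdef, Nat.mod_add_mod, Nat.add_assoc]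
    have hq' : groups.drop (m + 1) ++ groups.take m ++ [groups.getD m 0]
        = pvRot groups ((i + (k + 1)) % n) := by
      rw [← hmod, hn]
      exact pvRot_step groups m hm
    rw [pvRot_cons groups m hm]
    rw [doCaseInnerA, hlen]
    by_cases hs : seated < seats
    · rw [if_pos hs]
      by_cases hfit : groups.getD m 0 ≤ seats - seated
      · rw [if_pos hfit]
        rw [doCaseRunB, dif_pos ⟨hs, hk⟩, ← hmdef, if_neg (not_lt.mpr hfit)]
        rcases Nat.lt_or_ge (k + 1) n with hk1 | hk1
        · rw [if_neg (by omega), hq']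
          exact ih (k + 1) (seated + groups.getD m 0) (by omega) hk1
        · rw [if_pos (by omega)]
          -- B's recursive call stops immediately: k + 1 = n
          rw [doCaseRunB, dif_neg (by omega)]
          dsimp only
          rw [hq']
      · rw [if_neg hfit]
        rw [doCaseRunB, dif_pos ⟨hs, hk⟩, ← hmdef, if_pos (not_le.mp hfit)]
        dsimp only
        rw [← pvRot_cons groups m hm]
    · rw [if_neg hs]
      rw [doCaseRunB, dif_neg (by tauto), ← hmdef]
      dsimp only
      rw [← pvRot_cons groups m hm]

-- trajectory of start positions and revenue sums, for the proofs only
def pvNxt (seats : Int) (groups : List Int) (n : Nat) (j : Nat) : Nat :=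
  (doCaseRunB seats groups n j 0 0).2

def pvRev (seats : Int) (groups : List Int) (n : Nat) (j : Nat) : Int :=
  (doCaseRunB seats groups n j 0 0).1

def pvIt (seats : Int) (groups : List Int) (n : Nat) : Nat → Nat → Nat
  | j, 0 => j
  | j, m + 1 => pvIt seats groups n (pvNxt seats groups n j) m

def pvS (seats : Int) (groups : List Int) (n : Nat) : Nat → Nat → Int
  | _, 0 => 0
  | j, m + 1 => pvRev seats groups n j + pvS seats groups n (pvNxt seats groups n j) m

theorem pvIt_add (seats : Int) (groups : List Int) (n : Nat) :
    ∀ (a b j : Nat), pvIt seats groups n j (a + b) = pvIt seats groups n (pvIt seats groups n j a) b := by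
  intro a
  induction a with
  | zero => intro b j; rw [Nat.zero_add]; rfl
  | succ a ih =>
    intro b j
    rw [show a + 1 + b = (a + b) + 1 by omega]
    show pvIt seats groups n (pvNxt seats groups n j) (a + b) = _
    rw [ih]
    rfl

theorem pvS_add (seats : Int) (groups : List Int) (n : Nat) :
    ∀ (a b j : Nat), pvS seats groups n j (a + b)
      = pvS seats groups n j a + pvS seats groups n (pvIt seats groups n j a) b := by
  intro a
  induction a with
  | zero => intro b j; rw [Nat.zero_add]; show pvS seats groups n j b = 0 + pvS seats groups n j b; ring
  | succ a ih =>
    intro b j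
    rw [show a + 1 + b = (a + b) + 1 by omega]
    show pvRev seats groups n j + pvS seats groups n (pvNxt seats groups n j) (a + b) = _
    rw [ih]
    show _ = pvRev seats groups n j + pvS seats groups n (pvNxt seats groups n j) a
      + pvS seats groups n (pvIt seats groups n (pvNxt seats groups n j) a) b
    ring

theorem pvS_cycle (seats : Int) (groups : List Int) (n : Nat) (i c : Nat)
    (hc : pvIt seats groups n i c = i) :
    ∀ (q r : Nat), pvS seats groups n i (q * c + r)
      = (q : Int) * pvS seats groups n i c + pvS seats groups n i r := by
  intro q
  induction q with
  | zero => intro r; simp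
  | succ q ih =>
    intro r
    rw [show (q + 1) * c + r = c + (q * c + r) by ring]
    rw [pvS_add seats groups n c (q * c + r) i, hc, ih r]
    push_cast
    ring

-- A's outer loop, started on a rotation, sums the trajectory revenues
theorem pvOuter_S (seats : Int) (groups : List Int) (n : Nat) (hn : n = groups.length)
    (hn0 : 0 < n) :
    ∀ (m : Nat) (euros : Int) (j : Nat), j < n →
      doCaseOuterA seats (m : Int) (pvRot groups j) euros
        = euros + pvS seats groups n j m := by
  intro m
  induction m with
  | zero =>
    intro euros j hj
    rw [doCaseOuterA, dif_neg (by omega)]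
    show euros = euros + 0
    ring
  | succ m ih =>
    intro euros j hj
    rw [doCaseOuterA, dif_pos (by exact_mod_cast Nat.succ_pos m)]
    have hlen : (pvRot groups j).length = n := by rw [hn]; exact pvRot_length groups j (by omega)
    have hinner := pvInner_eq seats groups n hn j n 0 0 (by omega) hn0
    rw [Nat.add_zero, Nat.mod_eq_of_lt hj] at hinner
    rw [hlen, hinner]
    rw [show ((m + 1 : Nat) : Int) - 1 = (m : Int) by push_cast; ring]
    dsimp only
    rw [ih _ _ (pvRunB_lt seats groups n hn0 j 0 0)]
    show _ = euros + (pvRev seats groups n j + pvS seats groups n (pvNxt seats groups n j) m)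
    show euros + pvRev seats groups n j + pvS seats groups n (pvNxt seats groups n j) m = _
    ring

theorem pvTail_S (seats : Int) (groups : List Int) (n : Nat) :
    ∀ (r : Nat) (euros : Int) (i : Nat),
      doCaseTailB seats groups n euros i r = euros + pvS seats groups n i r := by
  intro r
  induction r with
  | zero => intro euros i; show euros = euros + 0; ring
  | succ r ih =>
    intro euros i
    show doCaseTailB seats groups n (euros + pvRev seats groups n i) (pvNxt seats groups n i) r = _
    rw [ih]
    show _ = euros + (pvRev seats groups n i + pvS seats groups n (pvNxt seats groups n i) r)
    ring

-- invariant of the memoising loop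
theorem pvSeen_spec (seats : Int) (groups : List Int) (n : Nat) (runs : Nat) :
    ∀ (fuel : Nat) (seen : PySem.Dict Nat (Nat × Int)) (euros : Int) (i step : Nat),
      fuel = runs - step →
      step ≤ runs →
      euros = pvS seats groups n 0 step →
      i = pvIt seats groups n 0 step →
      (∀ x t e', seen.get? x = some (t, e') →
        t < step ∧ pvIt seats groups n 0 t = x ∧ e' = pvS seats groups n 0 t) →
      (doCaseSeenB seats groups n runs seen euros i step).2.2.2 ≤ runs ∧
      (doCaseSeenB seats groups n runs seen euros i step).2.1
        = pvS seats groups n 0 (doCaseSeenB seats groups n runs seen euros i step).2.2.2 ∧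
      (doCaseSeenB seats groups n runs seen euros i step).2.2.1
        = pvIt seats groups n 0 (doCaseSeenB seats groups n runs seen euros i step).2.2.2 ∧
      (∀ x t e', (doCaseSeenB seats groups n runs seen euros i step).1.get? x = some (t, e') →
        t < (doCaseSeenB seats groups n runs seen euros i step).2.2.2 ∧
        pvIt seats groups n 0 t = x ∧ e' = pvS seats groups n 0 t) ∧
      ((doCaseSeenB seats groups n runs seen euros i step).2.2.2 < runs →
        ((doCaseSeenB seats groups n runs seen euros i step).1.get?
          (doCaseSeenB seats groups n runs seen euros i step).2.2.1).isSome) := by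
  intro fuel
  induction fuel with
  | zero =>
    intro seen euros i step hfuel hle he hi hseen
    rw [doCaseSeenB, dif_neg (by rintro ⟨h1, _⟩; omega)]
    exact ⟨hle, he, hi, hseen, fun hlt => absurd hlt (by show ¬ step < runs; omega)⟩
  | succ fuel ih =>
    intro seen euros i step hfuel hle he hi hseen
    by_cases hcond : step < runs ∧ seen.contains i = false
    · rw [doCaseSeenB, dif_pos hcond]
      have he' : euros + (doCaseRunB seats groups n i 0 0).1 = pvS seats groups n 0 (step + 1) := by
        rw [pvS_add seats groups n step 1 0, ← he, ← hi]
        show _ = euros + (pvRev seats groups n i + 0)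
        show euros + pvRev seats groups n i = _
        ring
      have hi' : (doCaseRunB seats groups n i 0 0).2 = pvIt seats groups n 0 (step + 1) := by
        rw [pvIt_add seats groups n step 1 0, ← hi]
        rfl
      have hseen' : ∀ x t e', (seen.insert i (step, euros)).get? x = some (t, e') →
          t < step + 1 ∧ pvIt seats groups n 0 t = x ∧ e' = pvS seats groups n 0 t := by
        intro x t e' hx
        rw [PySem.Dict.get?_insert] at hx
        by_cases hxi : x = i
        · rw [if_pos hxi] at hx
          obtain ⟨rfl, rfl⟩ : step = t ∧ euros = e' := by
            constructor <;> [exact congrArg Prod.fst (Option.some.inj hx);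
              exact congrArg Prod.snd (Option.some.inj hx)]
          exact ⟨by omega, by rw [hxi, hi], he⟩
        · rw [if_neg hxi] at hx
          obtain ⟨h1, h2, h3⟩ := hseen x t e' hx
          exact ⟨by omega, h2, h3⟩
      exact ih (seen.insert i (step, euros)) (euros + (doCaseRunB seats groups n i 0 0).1)
        (doCaseRunB seats groups n i 0 0).2 (step + 1) (by omega) (by omega) he' hi' hseen' 
    · rw [doCaseSeenB, dif_neg hcond]
      refine ⟨hle, he, hi, hseen, ?_⟩
      intro hlt
      have hcont : seen.contains i = true := by
        rcases Bool.eq_false_or_eq_true (seen.contains i) with hb | hb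
        · exact hb
        · exact absurd ⟨hlt, hb⟩ hcond
      rw [PySem.Dict.contains_eq_isSome_get?] at hcont
      exact hcont

theorem pvOuter_nonpos_seats (seats : Int) (hs : seats ≤ 0) :
    ∀ (m : Nat) (runs : Int), runs.toNat = m →
      ∀ (q : List Int) (euros : Int), doCaseOuterA seats runs q euros = euros := by
  intro m
  induction m with
  | zero => intro runs hr q euros; rw [doCaseOuterA, dif_neg (by omega)]
  | succ m ih =>
    intro runs hr q euros
    rw [doCaseOuterA, dif_pos (by omega)]
    have hq : doCaseInnerA seats q.length 0 0 q = (0, q) := by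
      cases q with
      | nil => rfl
      | cons a l =>
        rw [show (a :: l).length = l.length + 1 from rfl, doCaseInnerA, if_neg (by omega)]
    rw [hq]
    simpa using ih (runs - 1) (by omega) q euros

-- ===== VERDICT (by name: the statement is the Claim_ definition above) =====
theorem do_case_spec : Claim_equal_do_case := by
  intro seats runs groups _ hpre
  unfold Spec_do_case do_case do_case_alt
  by_cases hr : runs ≤ 0
  · rw [doCaseOuterA, dif_neg (by omega), if_pos (Or.inl hr)]
  · by_cases hs : seats ≤ 0
    · rw [pvOuter_nonpos_seats seats hs runs.toNat runs rfl, if_pos (Or.inr hs)]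
    · have hg : groups ≠ [] := by
        rcases hpre with h | h | h
        · exact h
        · omega
        · omega
      have hn0 : 0 < groups.length := List.length_pos_iff.mpr hg
      rw [if_neg (by omega)]
      set n := groups.length with hn
      set R := runs.toNat with hR
      -- A's side: the trajectory sum over R runs
      have hA : doCaseOuterA seats runs groups 0 = pvS seats groups n 0 R := by
        have hrot : groups = pvRot groups 0 := by simp [pvRot]
        have hruns : runs = ((R : Nat) : Int) := by omega
        calc doCaseOuterA seats runs groups 0
            = doCaseOuterA seats ((R : Nat) : Int) (pvRot groups 0) 0 := by rw [← hrot, ← hruns]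
          _ = 0 + pvS seats groups n 0 R := pvOuter_S seats groups n hn hn0 R 0 0 hn0
          _ = pvS seats groups n 0 R := by ring
      rw [hA]
      -- B's side
      have hspec := pvSeen_spec seats groups n R (R - 0) PySem.Dict.empty 0 0 0 rfl
        (by omega) rfl rfl (by intro x t e' hx; rw [PySem.Dict.get?_empty] at hx; cases hx)
      set res := doCaseSeenB seats groups n R PySem.Dict.empty 0 0 0 with hres
      obtain ⟨hle, heu, hit, hmem, hstop⟩ := hspec
      unfold doCaseFinishB
      by_cases hlt : res.2.2.2 < R
      · rw [if_pos hlt]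
        obtain ⟨⟨s0, e0⟩, hsome⟩ := Option.isSome_iff_exists.mp (hstop hlt)
        rw [hsome]
        dsimp only
        obtain ⟨hs0lt, hs0it, hs0e⟩ := hmem _ _ _ hsome
        set step := res.2.2.2
        set c := step - s0 with hc
        set rem := R - step with hrem
        have hcpos : 0 < c := by omega
        -- the trajectory is periodic with period c from position res.2.2.1
        have hiter : pvIt seats groups n res.2.2.1 c = res.2.2.1 := by
          calc pvIt seats groups n res.2.2.1 c
              = pvIt seats groups n (pvIt seats groups n 0 s0) c := by rw [hs0it]
            _ = pvIt seats groups n 0 (s0 + c) := (pvIt_add seats groups n s0 c 0).symm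
            _ = pvIt seats groups n 0 step := by rw [show s0 + c = step by omega]
            _ = res.2.2.1 := hit.symm
        have hcrev : res.2.1 - e0 = pvS seats groups n res.2.2.1 c := by
          rw [heu, hs0e, show step = s0 + c by omega, pvS_add seats groups n s0 c 0, hs0it]
          ring
        rw [pvTail_S]
        rw [hcrev]
        have hsplit : pvS seats groups n res.2.2.1 rem
            = ((rem / c : Nat) : Int) * pvS seats groups n res.2.2.1 c
              + pvS seats groups n res.2.2.1 (rem % c) := by
          rw [← pvS_cycle seats groups n res.2.2.1 c hiter (rem / c) (rem % c),
            Nat.div_add_mod']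
        have hfull : pvS seats groups n 0 R
            = res.2.1 + pvS seats groups n res.2.2.1 rem := by
          rw [heu, hit, show R = step + rem by omega, pvS_add seats groups n step rem 0]

        rw [hfull, hsplit]
        ring
      · rw [if_neg hlt]
        rw [heu, show res.2.2.2 = R by omega]
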